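-- pv_equiv track=rewrite | github.com/GavinGuan95/Punctuator.Pytorch | data/ted_transcript.py | convert_string_to_filename
-- ===== SOURCE A (Python) =====
-- import string
--
-- valid_chars = "-_.()%s%s" % (string.ascii_letters, string.digits)
--
-- def convert_string_to_filename(link):
--     """
--     Convert a html string to a valid filename string.
--     This function is designed to record an html link as a filename. However, html link contains characters
--     not valid as part of the filename. Therefore, these characters need to be converted to their unicode equivalent,
--     marked by surrounding X.
--     """
--     filename_tokens = []
--     for char in link:
--         if char in valid_chars:
--             filename_tokens.append(char)
--         else:
--             filename_tokens.append("_X" + str(ord(char)) + "X_")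
--     filename = ''.join(filename_tokens)
--     if len(filename) > 250:
--         filename = filename[0:250]
--     return filename
-- ===== SOURCE B (Python) =====
-- import string
-- from itertools import groupby, islice
--
-- valid_chars = "-_.()%s%s" % (string.ascii_letters, string.digits)
-- _valid = frozenset(valid_chars)
--
--
-- def convert_string_to_filename(link):
--     """Segment the link into maximal runs of valid / invalid characters (lazy
--     groupby); copy valid runs verbatim and escape invalid runs, reading at most
--     250 characters of any run (a 250-char run already fills the 250-char cap,
--     since every character yields at least one output character) and stopping as
--     soon as 250 output characters are collected; finally cap at 250."""
--     pieces = []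
--     total = 0
--     for ok, run in groupby(link, key=_valid.__contains__):
--         head = islice(run, 250)
--         piece = ''.join(head) if ok else ''.join("_X%dX_" % ord(c) for c in head)
--         pieces.append(piece)
--         total += len(piece)
--         if total >= 250:
--             break
--     return ''.join(pieces)[:250]
-- ===== Notes on version B (the rewrite author's own statement) =====
-- stated objective: faster
-- what changed: Replaced the per-character loop over the whole input by a lazy itertools.groupby segmentation into maximal valid/invalid runs, reading at most 250 characters per run and breaking out of the loop as soon as 250 output characters are collected, so long inputs are never fully traversed.
import Mathlib
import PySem

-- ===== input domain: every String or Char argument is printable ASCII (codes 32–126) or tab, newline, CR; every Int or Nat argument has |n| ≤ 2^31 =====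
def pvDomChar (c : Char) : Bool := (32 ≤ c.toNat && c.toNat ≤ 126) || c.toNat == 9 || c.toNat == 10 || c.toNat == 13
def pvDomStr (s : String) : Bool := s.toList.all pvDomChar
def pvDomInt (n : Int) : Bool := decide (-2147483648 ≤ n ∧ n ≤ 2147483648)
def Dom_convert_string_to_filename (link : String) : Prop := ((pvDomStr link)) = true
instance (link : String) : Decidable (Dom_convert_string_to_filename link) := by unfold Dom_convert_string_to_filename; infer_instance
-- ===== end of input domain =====

-- B segments the input into maximal valid/invalid runs and stops once 250 output
-- characters are collected (faster on long inputs); proved to return A's exact value.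

-- ===== PORT A =====
-- valid_chars = "-_.()" + ascii_letters + digits
def pvValidChars : String :=
  "-_.()abcdefghijklmnopqrstuvwxyzABCDEFGHIJKLMNOPQRSTUVWXYZ0123456789"

def convert_string_to_filename (link : String) : String :=
  -- for char in link: append char if valid else "_X"+str(ord(char))+"X_"
  let filename_tokens := link.toList.foldl (fun acc ch =>
      if ch ∈ pvValidChars.toList then acc ++ [String.ofList [ch]]
      else acc ++ ["_X" ++ PySem.Int.toStr (ch.toNat : Int) ++ "X_"]) []
  let filename := PySem.Str.join "" filename_tokens
  if PySem.Str.len filename > 250 then PySem.Str.slice filename (some 0) (some 250)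
  else filename

-- ===== PORT B =====
-- _valid.__contains__
def pvValid (c : Char) : Bool := pvValidChars.toList.contains c

-- "_X%dX_" % ord(c)
def pvEsc (c : Char) : List Char := ("_X" ++ PySem.Int.toStr (c.toNat : Int) ++ "X_").toList

-- itertools.groupby(link, key=_valid.__contains__): maximal runs with their key
def pvRuns : List Char → List (Bool × List Char)
  | [] => []
  | c :: cs =>
      let p := cs.span (fun d => pvValid d == pvValid c)
      (pvValid c, c :: p.1) :: pvRuns p.2
  termination_by l => l.length
  decreasing_by
    simp only [List.span_eq_takeWhile_dropWhile]
    exact Nat.lt_succ_of_le (List.length_dropWhile_le _ _)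

-- head = islice(run, 250); piece = ''.join(head) if ok else ''.join(escapes of head)
def pvPiece (r : Bool × List Char) : List Char :=
  if r.1 then r.2.take 250 else (r.2.take 250).flatMap pvEsc

-- the for-loop over groupby with the 'total >= 250: break' early exit
def pvLoop : List (Bool × List Char) → List Char → List Char
  | [], acc => acc
  | r :: rs, acc =>
      let acc' := acc ++ pvPiece r
      if 250 ≤ acc'.length then acc' else pvLoop rs acc'

def convert_string_to_filename_alt (link : String) : String :=
  PySem.Str.slice (String.ofList (pvLoop (pvRuns link.toList) [])) none (some 250)

-- ===== PRECONDITION & SPEC =====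
def Spec_convert_string_to_filename (link : String) (out : String) : Prop := out = convert_string_to_filename_alt link
instance (link : String) (out : String) : Decidable (Spec_convert_string_to_filename link out) := by unfold Spec_convert_string_to_filename; infer_instance

-- ===== CLAIM (what is proved, stated in full; the proofs are below) =====
def Claim_equal_convert_string_to_filename : Prop := ∀ (link : String), Dom_convert_string_to_filename link → Spec_convert_string_to_filename link (convert_string_to_filename link)

-- ===== LEMMAS AND PROOFS =====

-- per-char token, list form
def pvTok (c : Char) : List Char := if pvValid c then [c] else pvEsc c

-- a run's full (untruncated) expansion
def pvFull (r : Bool × List Char) : List Char :=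
  if r.1 then r.2 else r.2.flatMap pvEsc

theorem pvEsc_len (c : Char) : 1 ≤ (pvEsc c).length := by
  simp [pvEsc, String.toList_append]

theorem le_length_flatMap_pvEsc (l : List Char) : l.length ≤ (l.flatMap pvEsc).length := by
  induction l with
  | nil => simp
  | cons c cs ih =>
    simp only [List.flatMap_cons, List.length_cons, List.length_append]
    have := pvEsc_len c
    omega

-- the truncated piece is a prefix of the full expansion, and whenever it is a
-- strict prefix it already has ≥ 250 characters
theorem pvPiece_full (r : Bool × List Char) :
    ∃ t, pvFull r = pvPiece r ++ t ∧ (t ≠ [] → 250 ≤ (pvPiece r).length) := by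
  obtain ⟨k, l⟩ := r
  cases k with
  | true =>
    refine ⟨l.drop 250, (List.take_append_drop 250 l).symm, ?_⟩
    intro ht
    have : 250 < l.length := by
      by_contra h
      exact ht (List.drop_eq_nil_of_le (by omega))
    show 250 ≤ (l.take 250).length
    simp
    omega
  | false =>
    refine ⟨(l.drop 250).flatMap pvEsc, ?_, ?_⟩
    · show l.flatMap pvEsc = (l.take 250).flatMap pvEsc ++ (l.drop 250).flatMap pvEsc
      rw [← List.flatMap_append, List.take_append_drop]
    · intro ht
      have hd : l.drop 250 ≠ [] := fun h => ht (by simp [h])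
      have : 250 < l.length := by
        by_contra h
        exact hd (List.drop_eq_nil_of_le (by omega))
      have h250 : (l.take 250).length = 250 := by simp; omega
      have := le_length_flatMap_pvEsc (l.take 250)
      show 250 ≤ ((l.take 250).flatMap pvEsc).length
      omega

-- B's loop, up to take 250, is the full concatenation of the runs' expansions
theorem pvLoop_take (rs : List (Bool × List Char)) (acc : List Char) :
    (pvLoop rs acc).take 250 = (acc ++ rs.flatMap pvFull).take 250 := by
  induction rs generalizing acc with
  | nil => simp [pvLoop]
  | cons r rs ih =>
    obtain ⟨t, hfull, hlen⟩ := pvPiece_full r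
    simp only [pvLoop, List.flatMap_cons, hfull]
    by_cases h : 250 ≤ (acc ++ pvPiece r).length
    · rw [if_pos h, show acc ++ (pvPiece r ++ t ++ List.flatMap pvFull rs)
          = (acc ++ pvPiece r) ++ (t ++ List.flatMap pvFull rs) by simp,
        List.take_append_of_le_length h]
    · have ht : t = [] := by
        by_contra htne
        have := hlen htne
        simp [List.length_append] at h
        omega
      subst ht
      rw [if_neg h, ih, List.append_nil, List.append_assoc]

-- a run with key k and all members of validity k contributes its chars' tokens
theorem pvFull_run (k : Bool) (l : List Char) (h : ∀ x ∈ l, pvValid x = k) :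
    pvFull (k, l) = l.flatMap pvTok := by
  cases k with
  | true =>
    simp only [pvFull]
    induction l with
    | nil => simp
    | cons c cs ih =>
      have hc := h c (by simp)
      simp only [List.flatMap_cons, pvTok, hc]
      simpa using (ih (fun x hx => h x (by simp [hx]))) ▸ rfl
  | false =>
    simp only [pvFull]
    refine (if_neg (by simp)).trans ?_
    refine List.flatMap_congr ?_
    intro x hx
    simp [pvTok, h x hx]

-- groupby segmentation flattens back to the per-char tokens
theorem pvRuns_flatMap (cs : List Char) :
    (pvRuns cs).flatMap pvFull = cs.flatMap pvTok := by
  induction hn : cs.length using Nat.strong_induction_on generalizing cs with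
  | _ n ih =>
    cases cs with
    | nil => simp [pvRuns]
    | cons c cs =>
      rw [pvRuns]
      simp only [List.span_eq_takeWhile_dropWhile, List.flatMap_cons]
      have hsplit : cs = cs.takeWhile (fun d => pvValid d == pvValid c)
          ++ cs.dropWhile (fun d => pvValid d == pvValid c) :=
        (List.takeWhile_append_dropWhile).symm
      have hall : ∀ x ∈ c :: cs.takeWhile (fun d => pvValid d == pvValid c),
          pvValid x = pvValid c := by
        intro x hx
        rcases List.mem_cons.mp hx with h | h
        · rw [h]
        · exact of_decide_eq_true (by simpa using List.mem_takeWhile_imp h)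
      have hrec : (pvRuns (cs.dropWhile (fun d => pvValid d == pvValid c))).flatMap pvFull
          = (cs.dropWhile (fun d => pvValid d == pvValid c)).flatMap pvTok := by
        refine ih _ ?_ _ rfl
        subst hn
        exact Nat.lt_succ_of_le (List.length_dropWhile_le _ _)
      rw [pvFull_run _ _ hall, hrec]
      simp only [List.flatMap_cons]
      rw [List.append_assoc, ← List.flatMap_append, ← hsplit]

theorem join_nil_eq_flatten (ls : List (List Char)) :
    PySem.Chars.join [] ls = ls.flatten := by
  induction ls with
  | nil => rfl
  | cons x xs ih =>
    cases xs with
    | nil => simp [PySem.Chars.join, List.intercalate]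
    | cons y ys =>
      simp only [PySem.Chars.join, List.intercalate] at *
      simp [List.intersperse] at *
      simpa using ih

-- A's value, as a list of chars: take 250 of the concatenated per-char tokens
theorem convA_toList (link : String) :
    (convert_string_to_filename link).toList
      = (link.toList.flatMap pvTok).take 250 := by
  unfold convert_string_to_filename
  set tokS : Char → String := fun ch =>
    if ch ∈ pvValidChars.toList then String.ofList [ch]
    else "_X" ++ PySem.Int.toStr (ch.toNat : Int) ++ "X_" with htokS
  have hfold : link.toList.foldl (fun acc ch =>
      if ch ∈ pvValidChars.toList then acc ++ [String.ofList [ch]]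
      else acc ++ ["_X" ++ PySem.Int.toStr (ch.toNat : Int) ++ "X_"]) []
      = link.toList.map tokS := by
    refine (PySem.List.foldl_congr_mem link.toList _ (fun acc ch => acc ++ [tokS ch]) []
        ?_).trans (by simpa using PySem.List.foldl_append_singleton_eq_map tokS link.toList [])
    intro acc x _; by_cases h : x ∈ pvValidChars.toList <;> simp [htokS, h]
  have htokL : ∀ ch : Char, (tokS ch).toList = pvTok ch := by
    intro ch
    by_cases h : ch ∈ pvValidChars.toList
    · simp [htokS, h, pvTok, pvValid, String.toList_ofList]
    · have : pvValid ch = false := by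
        simp [pvValid]; exact fun hc => h (List.contains_iff_mem.mp (by simpa using hc))
      simp [htokS, h, pvTok, this, pvEsc]
  have hjoin : (PySem.Str.join "" (link.toList.map tokS)).toList
      = link.toList.flatMap pvTok := by
    rw [PySem.Str.toList_join, String.toList_empty, join_nil_eq_flatten]
    simp only [List.map_map]
    rw [List.flatten_eq_flatMap, List.flatMap_map]
    exact List.flatMap_congr (fun x _ => by simp [Function.comp, htokL])
  simp only [hfold]
  by_cases hlen : PySem.Str.len (PySem.Str.join "" (link.toList.map tokS)) > 250
  · simp only [hlen, if_pos]
    rw [PySem.Str.toList_slice, PySem.Chars.slice_eq_listSlice]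
    simp only [PySem.List.slice_zero_start]
    rw [PySem.List.slice_to _ (by norm_num)]
    simp [hjoin]
  · simp only [hlen, if_neg, not_false_eq_true]
    have hle : (PySem.Str.join "" (link.toList.map tokS)).toList.length ≤ 250 := by
      have := PySem.Str.len_eq (PySem.Str.join "" (link.toList.map tokS))
      omega
    rw [hjoin] at hle ⊢
    exact (List.take_of_length_le hle).symm

-- B's value, as a list of chars: the same list
theorem convB_toList (link : String) :
    (convert_string_to_filename_alt link).toList
      = (link.toList.flatMap pvTok).take 250 := by
  unfold convert_string_to_filename_alt
  rw [PySem.Str.toList_slice, PySem.Chars.slice_eq_listSlice,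
      PySem.List.slice_to _ (by norm_num : (0:Int) ≤ 250)]
  rw [String.toList_ofList]
  have := pvLoop_take (pvRuns link.toList) []
  rw [(by decide : (250:Int).toNat = 250), this, List.nil_append, pvRuns_flatMap]

-- ===== VERDICT (by name: the statement is the Claim_ definition above) =====
theorem convert_string_to_filename_spec : Claim_equal_convert_string_to_filename := by
  intro link _
  unfold Spec_convert_string_to_filename
  rw [← String.toList_inj, convA_toList, convB_toList]
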